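-- pv_equiv track=rewrite | github.com/runt1me/rop-emporium | fluff/pext.py | pext
-- ===== SOURCE A (Python) =====
-- def pext(src, mask):
--     """Simulate x86 BMI2 pext for 32-bit values."""
--     dst = 0
--     out_bit = 0
--     bit = 0
--     while bit < 32:
--         if (mask >> bit) & 1:
--             if (src >> bit) & 1:
--                 dst |= (1 << out_bit)
--             out_bit += 1
--         bit += 1
--     return dst
-- ===== SOURCE B (Python) =====
-- def pext(src, mask):
--     """Simulate x86 BMI2 pext for 32-bit values.
--
--     Recursive decomposition: extract the low bit (if selected by the mask)
--     and compose it with the extraction of the remaining 31 bits of the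
--     shifted operands, building the result back-to-front -- no dst/out_bit
--     accumulators.
--     """
--     def go(s, m, n):
--         if n == 0:
--             return 0
--         rest = go(s >> 1, m >> 1, n - 1)
--         if m & 1:
--             return (s & 1) | (rest << 1)
--         return rest
--     return go(src, mask, 32)
-- ===== Notes on version B (the rewrite author's own statement) =====
-- stated objective: alternative
-- what changed: Replaced the iterative 32-step scan with dst/out_bit accumulators by a structural recursion on shifted operands that extracts the low bit and composes the result back-to-front with no accumulators.
import Mathlib
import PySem

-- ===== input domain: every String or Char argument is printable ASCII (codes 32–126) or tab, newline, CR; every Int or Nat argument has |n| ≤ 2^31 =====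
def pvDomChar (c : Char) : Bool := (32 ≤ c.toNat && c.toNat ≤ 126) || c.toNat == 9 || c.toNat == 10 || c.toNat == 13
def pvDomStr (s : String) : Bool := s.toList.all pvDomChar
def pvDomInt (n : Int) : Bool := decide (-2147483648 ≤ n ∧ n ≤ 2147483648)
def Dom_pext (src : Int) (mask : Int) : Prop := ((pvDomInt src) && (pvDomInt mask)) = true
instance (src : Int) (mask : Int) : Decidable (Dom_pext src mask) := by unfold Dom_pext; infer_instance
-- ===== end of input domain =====

-- B replaces A's iterative 32-step scan with dst/out_bit accumulators by a structural
-- recursion on shifted operands that composes the result back-to-front (objective: alternative).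


-- ===== PORT A =====
-- while bit < 32: if (mask>>bit)&1: (if (src>>bit)&1: dst |= 1<<out_bit); out_bit += 1; bit += 1
def pextLoop (src : Int) (mask : Int) (bit : Nat) (dst : Int) (out_bit : Nat) : Int :=
  if bit < 32 then
    if PySem.Int.band (mask >>> bit) 1 ≠ 0 then
      pextLoop src mask (bit + 1)
        (if PySem.Int.band (src >>> bit) 1 ≠ 0 then
          PySem.Int.bor dst ((1 : Int) <<< out_bit) else dst)
        (out_bit + 1)
    else
      pextLoop src mask (bit + 1) dst out_bit
  else dst
termination_by 32 - bit

def pext (src : Int) (mask : Int) : Int := pextLoop src mask 0 0 0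

-- ===== PORT B =====
-- go(s, m, n): 0 if n == 0 else ((s & 1) | (go(s>>1, m>>1, n-1) << 1) if m & 1 else go(s>>1, m>>1, n-1))
def pextGo (s : Int) (m : Int) (n : Nat) : Int :=
  match n with
  | 0 => 0
  | n + 1 =>
    let rest := pextGo (s >>> (1:Nat)) (m >>> (1:Nat)) n
    if PySem.Int.band m 1 ≠ 0 then PySem.Int.bor (PySem.Int.band s 1) (rest <<< (1:Nat)) else rest

def pext_alt (src : Int) (mask : Int) : Int := pextGo src mask 32

-- ===== PRECONDITION & SPEC =====
def Spec_pext (src : Int) (mask : Int) (out : Int) : Prop := out = pext_alt src mask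
instance (src : Int) (mask : Int) (out : Int) : Decidable (Spec_pext src mask out) := by unfold Spec_pext; infer_instance

-- ===== CLAIM (what is proved, stated in full; the proofs are below) =====
def Claim_equal_pext : Prop := ∀ (src : Int) (mask : Int), Dom_pext src mask → Spec_pext src mask (pext src mask)

-- ===== LEMMAS AND PROOFS =====

-- a & 1 is 0 or 1
lemma band1_cases (a : Int) : PySem.Int.band a 1 = 0 ∨ PySem.Int.band a 1 = 1 := by
  rw [PySem.Int.band_one]
  have h0 := PySem.Int.mod_nonneg a (b := 2) (by norm_num)
  have h1 := PySem.Int.mod_lt a (b := 2) (by norm_num)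
  omega

-- Nat: x ||| 2^k = x + 2^k when x < 2^k
lemma nat_or_two_pow (x k : Nat) (h : x < 2 ^ k) : x ||| 2 ^ k = x + 2 ^ k := by
  rw [Nat.or_comm]
  have := Nat.two_pow_add_eq_or_of_lt (i := k) h 1
  simp at this
  omega

-- Nat: 2*x ||| 1 = 2*x + 1
lemma nat_two_mul_or_one (x : Nat) : 2 * x ||| 1 = 2 * x + 1 := by
  have := Nat.two_pow_add_eq_or_of_lt (i := 1) (b := 1) (by norm_num) x
  norm_num at this
  exact this.symm

-- composing B's step: (s & 1) | (r << 1) = (s & 1) + 2*r for 0 ≤ r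
lemma bor_low_bit (s r : Int) (hr : 0 ≤ r) :
    PySem.Int.bor (PySem.Int.band s 1) (r <<< (1:Nat)) = PySem.Int.band s 1 + 2 * r := by
  have hsh : r <<< (1:Nat) = 2 * r := by rw [Int.shiftLeft_eq]; ring
  lift r to Nat using hr with k
  rcases band1_cases s with h | h <;> rw [h, hsh]
  · rw [PySem.Int.bor_comm, PySem.Int.bor_zero]; ring
  · rw [show (2 * (k:Int)) = ((2*k : Nat) : Int) by push_cast; ring,
      show (1:Int) = ((1:Nat):Int) by norm_num, PySem.Int.bor_natCast,
      Nat.or_comm, nat_two_mul_or_one]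
    push_cast
    ring

-- setting A's output bit: dst | (1 << k) = dst + 2^k for 0 ≤ dst < 2^k
lemma bor_out_bit (dst : Int) (k : Nat) (h0 : 0 ≤ dst) (h1 : dst < 2 ^ k) :
    PySem.Int.bor dst ((1 : Int) <<< k) = dst + 2 ^ k := by
  have hsh : (1 : Int) <<< k = 2 ^ k := by rw [Int.shiftLeft_eq]; ring
  lift dst to Nat using h0 with d
  have hd : d < 2 ^ k := by exact_mod_cast h1
  rw [hsh, show ((2:Int) ^ k) = ((2^k : Nat) : Int) by push_cast; ring,
    PySem.Int.bor_natCast, nat_or_two_pow _ _ hd]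
  push_cast
  ring

lemma pextGo_nonneg (n : Nat) : ∀ (s m : Int), 0 ≤ pextGo s m n := by
  induction n with
  | zero => intro s m; simp [pextGo]
  | succ n ih =>
    intro s m
    rw [pextGo]
    have hr := ih (s >>> (1:Nat)) (m >>> (1:Nat))
    split
    · rw [bor_low_bit _ _ hr]
      rcases band1_cases s with h | h <;> omega
    · exact hr

-- (a >>> i) >>> 1 = a >>> (i+1)
lemma shiftRight_succ' (a : Int) (i : Nat) : (a >>> i) >>> (1:Nat) = a >>> (i + 1) := by
  simp only [Int.shiftRight_eq_div_pow]
  rw [Int.ediv_ediv_of_nonneg (by positivity : (0:Int) ≤ ((2 ^ i : Nat) : Int))]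
  congr 1

-- loop invariant: A's loop from bit with accumulator (dst, out_bit) equals dst plus
-- B's extraction of the remaining n = 32 - bit bits, shifted up by out_bit.
lemma loop_eq_go (src mask : Int) :
    ∀ (n bit : Nat) (dst : Int) (out_bit : Nat), bit + n = 32 → 0 ≤ dst → dst < 2 ^ out_bit →
      pextLoop src mask bit dst out_bit
        = dst + pextGo (src >>> bit) (mask >>> bit) n * 2 ^ out_bit := by
  intro n
  induction n with
  | zero =>
    intro bit dst out_bit hb _ _
    rw [pextLoop, if_neg (by omega)]
    simp [pextGo]
  | succ n ih =>
    intro bit dst out_bit hb hd0 hd1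
    rw [pextLoop, if_pos (by omega), pextGo]
    have hrest0 := pextGo_nonneg n ((src >>> bit) >>> (1:Nat)) ((mask >>> bit) >>> (1:Nat))
    by_cases hm : PySem.Int.band (mask >>> bit) 1 ≠ 0
    · rw [if_pos hm, if_pos hm]
      rw [bor_low_bit _ _ hrest0, shiftRight_succ', shiftRight_succ']
      by_cases hs : PySem.Int.band (src >>> bit) 1 ≠ 0
      · rw [if_pos hs]
        have hb1 : PySem.Int.band (src >>> bit) 1 = 1 := by
          rcases band1_cases (src >>> bit) with h | h
          · exact absurd h hs
          · exact h
        rw [bor_out_bit dst out_bit hd0 hd1]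
        rw [ih (bit + 1) (dst + 2 ^ out_bit) (out_bit + 1) (by omega) (by positivity)
          (by rw [pow_succ]; omega)]
        rw [hb1, pow_succ]
        ring
      · rw [if_neg hs]
        have hb0 : PySem.Int.band (src >>> bit) 1 = 0 := by
          by_contra hc; exact hs hc
        rw [ih (bit + 1) dst (out_bit + 1) (by omega) hd0 (by rw [pow_succ]; omega)]
        rw [hb0, pow_succ]
        ring
    · rw [if_neg hm, if_neg hm]
      rw [ih (bit + 1) dst out_bit (by omega) hd0 hd1, shiftRight_succ', shiftRight_succ']

-- ===== VERDICT (by name: the statement is the Claim_ definition above) =====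
theorem pext_spec : Claim_equal_pext := by
  intro src mask _
  show pext src mask = pext_alt src mask
  rw [pext, pext_alt, loop_eq_go src mask 32 0 0 0 (by omega) le_rfl (by norm_num)]
  simp
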